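-- pv_equiv track=rewrite | github.com/jykim4846/etf_check | collectors/tiger.py | short_code_to_kr_isin
-- ===== SOURCE A (Python) =====
-- def short_code_to_kr_isin(short_code: str) -> str:
--     code = f"KR7{str(short_code).strip()}00"
--     converted = ""
--     for char in code:
--         if char.isdigit():
--             converted += char
--         else:
--             converted += str(ord(char.upper()) - 55)
--
--     digits = []
--     for index, char in enumerate(converted):
--         digit = int(char)
--         if index % 2 == 0:
--             doubled = digit * 2
--             digits.extend(int(part) for part in str(doubled))
--         else:
--             digits.append(digit)
--
--     total = sum(digits)
--     check_digit = (10 - (total % 10)) % 10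
--     return f"{code}{check_digit}"
-- ===== SOURCE B (Python) =====
-- def short_code_to_kr_isin(short_code: str) -> str:
--     code = f"KR7{str(short_code).strip()}00"
--
--     def contrib(d: int, parity: int) -> int:
--         # digit-sum of the doubled digit at even positions, the digit itself at odd
--         return (2 * d if d < 5 else 2 * d - 9) if parity == 0 else d
--
--     pos = 0
--     total = 0
--     for char in code:
--         if char.isdigit():
--             total += contrib(ord(char) - 48, pos % 2)
--             pos += 1
--         else:
--             n = ord(char.upper()) - 55
--             if n < 10:
--                 total += contrib(n, pos % 2)
--                 pos += 1
--             else: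
--                 total += contrib(n // 10, pos % 2) + contrib(n % 10, (pos + 1) % 2)
--                 pos += 2
--
--     check_digit = (10 - total % 10) % 10
--     return f"{code}{check_digit}"
-- ===== Notes on version B (the rewrite author's own statement) =====
-- stated objective: simpler
-- what changed: A builds an expanded digit string and then an indexed digit list (doubling via str(2*d) digit-splitting) before summing; B makes one arithmetic pass over the code with a position counter and a running total, folding the doubled-digit sum into the closed form (2*d if d<5 else 2*d-9), building no intermediate string or list.
-- outside the precondition, e.g. on short_code_to_kr_isin('-'): A raises ValueError, B returns 'KR7-000'; on short_code_to_kr_isin('a-b'): A raises ValueError, B returns 'KR7a-b006'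
import Mathlib
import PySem

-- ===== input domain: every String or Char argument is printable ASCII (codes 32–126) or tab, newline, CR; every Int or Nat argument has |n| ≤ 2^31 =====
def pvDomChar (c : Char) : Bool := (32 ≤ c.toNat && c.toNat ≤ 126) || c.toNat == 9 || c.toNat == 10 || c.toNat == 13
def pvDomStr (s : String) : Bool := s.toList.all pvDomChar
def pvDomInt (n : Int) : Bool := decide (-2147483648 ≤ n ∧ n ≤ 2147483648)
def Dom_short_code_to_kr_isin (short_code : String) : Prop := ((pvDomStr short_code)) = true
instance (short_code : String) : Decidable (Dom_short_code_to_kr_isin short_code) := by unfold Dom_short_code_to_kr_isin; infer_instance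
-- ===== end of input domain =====

-- B replaces A's two string-building passes (letter expansion to a digit string, then an
-- indexed digit/double pass building a list) by one arithmetic pass over the code with a
-- position counter and a running total (objective: simpler).

-- ===== PORT A =====
-- int(char) for a one-char string; the ValueError (none) case is excluded by Pre_
def pvDigitVal (c : Char) : Int := (PySem.Int.ofChars? [c]).getD 0
-- body of A's first loop: converted += char / str(ord(char.upper()) - 55)
def pvConvStep (c : Char) : List Char :=
  if PySem.Chars.isdigit c then [c]
  else PySem.Int.toChars (((PySem.Chars.upperChar c).toNat : Int) - 55)
-- body of A's second loop: digits.extend(int(part) for part in str(digit*2)) / digits.append(digit)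
def pvDigStep (p : Int × Char) : List Int :=
  if PySem.Int.mod p.1 2 = 0 then (PySem.Int.toChars (pvDigitVal p.2 * 2)).map pvDigitVal
  else [pvDigitVal p.2]

def short_code_to_kr_isin (short_code : String) : String :=
  let code := "KR7" ++ PySem.Str.strip short_code ++ "00"
  let converted : List Char := code.toList.foldl (fun acc c => acc ++ pvConvStep c) []
  let digits : List Int := (PySem.List.enumerate converted).foldl (fun acc p => acc ++ pvDigStep p) []
  let total := digits.sum
  let check_digit := PySem.Int.mod (10 - PySem.Int.mod total 10) 10
  code ++ PySem.Int.toStr check_digit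

-- ===== PORT B =====
-- contribution of one decimal digit at a given parity of its expanded position
def pvContrib (d parity : Int) : Int :=
  if parity = 0 then (if d < 5 then 2 * d else 2 * d - 9) else d
-- body of B's single loop: state = (pos, total)
def pvStepB (st : Int × Int) (c : Char) : Int × Int :=
  if PySem.Chars.isdigit c then
    (st.1 + 1, st.2 + pvContrib ((c.toNat : Int) - 48) (PySem.Int.mod st.1 2))
  else
    let n : Int := ((PySem.Chars.upperChar c).toNat : Int) - 55
    if n < 10 then (st.1 + 1, st.2 + pvContrib n (PySem.Int.mod st.1 2))
    else (st.1 + 2, st.2 + pvContrib (PySem.Int.floordiv n 10) (PySem.Int.mod st.1 2)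
                         + pvContrib (PySem.Int.mod n 10) (PySem.Int.mod (st.1 + 1) 2))

def short_code_to_kr_isin_alt (short_code : String) : String :=
  let code := "KR7" ++ PySem.Str.strip short_code ++ "00"
  let st := code.toList.foldl pvStepB (0, 0)
  let check_digit := PySem.Int.mod (10 - PySem.Int.mod st.2 10) 10
  code ++ PySem.Int.toStr check_digit

-- ===== PRECONDITION & SPEC =====
-- Pre_ excludes exactly the inputs where A raises ValueError: a stripped character with code
-- point < 48 (space, punctuation '!'..'/', tab/newline inside) makes ord(upper)-55 negative,
-- so int() later hits the '-' sign character.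
def Pre_short_code_to_kr_isin (short_code : String) : Prop :=
  ((PySem.Str.strip short_code).toList.all (fun c => decide (48 ≤ c.toNat))) = true
instance (short_code : String) : Decidable (Pre_short_code_to_kr_isin short_code) := by
  unfold Pre_short_code_to_kr_isin; infer_instance
def pvWitness_short_code_to_kr_isin : String := "005930"

def Spec_short_code_to_kr_isin (short_code : String) (out : String) : Prop := out = short_code_to_kr_isin_alt short_code
instance (short_code : String) (out : String) : Decidable (Spec_short_code_to_kr_isin short_code out) := by unfold Spec_short_code_to_kr_isin; infer_instance

-- ===== CLAIM (what is proved, stated in full; the proofs are below) =====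
def Claim_equal_short_code_to_kr_isin : Prop := ∀ (short_code : String), Dom_short_code_to_kr_isin short_code → Pre_short_code_to_kr_isin short_code → Spec_short_code_to_kr_isin short_code (short_code_to_kr_isin short_code)

-- ===== LEMMAS AND PROOFS =====

-- A's second loop, summed, as a function of the digit list and the start index
def pvSumDig (l : List Char) (s : Int) : Int :=
  ((PySem.List.enumerate l s).flatMap pvDigStep).sum

theorem pvSumDig_cons (c : Char) (l : List Char) (s : Int) :
    pvSumDig (c :: l) s = (pvDigStep (s, c)).sum + pvSumDig l (s + 1) := by
  simp [pvSumDig, PySem.List.enumerate_cons]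

theorem pvSumDig_append (l1 l2 : List Char) (s : Int) :
    pvSumDig (l1 ++ l2) s = pvSumDig l1 s + pvSumDig l2 (s + l1.length) := by
  simp [pvSumDig, PySem.List.enumerate_append]

theorem pvDigStep_mod (p : Nat) (c : Char) :
    pvDigStep ((p : Int), c) = pvDigStep (((p % 2 : Nat) : Int), c) := by
  simp [pvDigStep]

theorem pvSumDig_mod (l : List Char) (p : Nat) :
    pvSumDig l (p : Int) = pvSumDig l ((p % 2 : Nat) : Int) := by
  induction l generalizing p with
  | nil => rfl
  | cons c l ih =>
    rw [pvSumDig_cons, pvSumDig_cons, pvDigStep_mod]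
    have h1 : ((p : Int) + 1) = ((p + 1 : Nat) : Int) := by push_cast; ring
    have h2 : (((p % 2 : Nat) : Int) + 1) = ((p % 2 + 1 : Nat) : Int) := by push_cast; ring
    rw [h1, h2, ih (p + 1), ih (p % 2 + 1)]
    have : (p + 1) % 2 = (p % 2 + 1) % 2 := by omega
    rw [this]

-- decimal facts about a single expanded block, at parity r ∈ {0,1}
theorem pvLetterBlock (n : Int) (h3 : 3 ≤ n) (h71 : n ≤ 71) (r : Nat) (hr : r < 2) :
    pvSumDig (PySem.Int.toChars n) (r : Int)
      = (if n < 10 then pvContrib n (r : Int)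
         else pvContrib (PySem.Int.floordiv n 10) (r : Int)
            + pvContrib (PySem.Int.mod n 10) (PySem.Int.mod ((r : Int) + 1) 2))
    ∧ (PySem.Int.toChars n).length = (if n < 10 then 1 else 2) := by
  interval_cases n <;> interval_cases r <;> exact ⟨by decide, by decide⟩

theorem pvDigitChar_bounds (c : Char) (h : PySem.Chars.isdigit c = true) :
    48 ≤ c.toNat ∧ c.toNat ≤ 57 := by
  simpa only [PySem.Chars.isdigit, Bool.and_eq_true, decide_eq_true_eq, Char.le_def,
    UInt32.le_iff_toNat_le] using h

theorem pvDigitBlock (c : Char) (h : PySem.Chars.isdigit c = true) (r : Nat) (hr : r < 2) :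
    pvSumDig [c] (r : Int) = pvContrib ((c.toNat : Int) - 48) (r : Int) := by
  have hb := pvDigitChar_bounds c h
  have hc : Char.ofNat c.toNat = c := Char.ofNat_toNat c
  obtain ⟨h1, h2⟩ := hb
  set m := c.toNat with hm
  rw [← hc]
  interval_cases m <;> interval_cases r <;> decide

theorem pvUpper_bounds (c : Char) (hd : PySem.Chars.isdigit c = false)
    (h1 : 48 ≤ c.toNat) (h2 : c.toNat ≤ 126) :
    58 ≤ (PySem.Chars.upperChar c).toNat ∧ (PySem.Chars.upperChar c).toNat ≤ 126 := by
  have hnd : ¬ (48 ≤ c.toNat ∧ c.toNat ≤ 57) := by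
    intro hcontra
    have : PySem.Chars.isdigit c = true := by
      simp only [PySem.Chars.isdigit, Bool.and_eq_true, decide_eq_true_eq, Char.le_def,
        UInt32.le_iff_toNat_le]
      exact hcontra
    simp [this] at hd
  have h58 : 58 ≤ c.toNat := by omega
  unfold PySem.Chars.upperChar
  by_cases hl : PySem.Chars.islower c = true
  · have hlb : 97 ≤ c.toNat ∧ c.toNat ≤ 122 := by
      simpa only [PySem.Chars.islower, Bool.and_eq_true, decide_eq_true_eq, Char.le_def,
        UInt32.le_iff_toNat_le] using hl
    have hv : (c.toNat - 32).isValidChar := Or.inl (by omega)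
    simp only [hl, if_true, Char.toNat_ofNat, hv, if_true]
    omega
  · simp only [Bool.not_eq_true] at hl
    simp only [hl, Bool.false_eq_true, if_false]
    omega

-- one character of the code: B's step equals A's block contribution
theorem pvPerChar (c : Char) (h1 : 48 ≤ c.toNat) (h2 : c.toNat ≤ 126) (p : Nat) (t : Int) :
    pvStepB ((p : Int), t) c
      = (((p + (pvConvStep c).length : Nat) : Int), t + pvSumDig (pvConvStep c) (p : Int)) := by
  have hmod : PySem.Int.mod (p : Int) 2 = ((p % 2 : Nat) : Int) := PySem.Int.mod_natCast p 2
  have hmod1 : PySem.Int.mod ((p : Int) + 1) 2 = (((p + 1) % 2 : Nat) : Int) := by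
    have : ((p : Int) + 1) = ((p + 1 : Nat) : Int) := by push_cast; ring
    rw [this]; exact PySem.Int.mod_natCast (p + 1) 2
  by_cases hd : PySem.Chars.isdigit c = true
  · simp only [pvStepB, pvConvStep, hd, if_true]
    rw [pvSumDig_mod _ p, pvDigitBlock c hd (p % 2) (Nat.mod_lt _ (by norm_num)), hmod]
    simp only [List.length_cons, List.length_nil, Prod.mk.injEq]
    exact ⟨by push_cast; ring, trivial⟩
  · have hd' : PySem.Chars.isdigit c = false := by simp_all
    obtain ⟨hu1, hu2⟩ := pvUpper_bounds c hd' h1 h2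
    set n : Int := ((PySem.Chars.upperChar c).toNat : Int) - 55 with hn
    have h3 : 3 ≤ n := by omega
    have h71 : n ≤ 71 := by omega
    have hb := pvLetterBlock n h3 h71 (p % 2) (Nat.mod_lt _ (by norm_num))
    simp only [pvStepB, pvConvStep, hd', if_false, Bool.false_eq_true]
    rw [pvSumDig_mod _ p, ← hn]
    by_cases hlt : n < 10
    · simp only [hlt, if_true] at hb ⊢
      rw [hb.1, hb.2, hmod]
      simp only [Prod.mk.injEq]
      exact ⟨by push_cast; ring, trivial⟩
    · simp only [hlt, if_false] at hb ⊢
      rw [hb.1, hb.2, hmod]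
      have hx : PySem.Int.mod ((p % 2 + 1 : Nat) : Int) 2 = (((p + 1) % 2 : Nat) : Int) := by
        have e2 : (p % 2 + 1) % 2 = (p + 1) % 2 := by omega
        rw [← e2]; exact PySem.Int.mod_natCast _ 2
      have : PySem.Int.mod (((p % 2 : Nat) : Int) + 1) 2 = PySem.Int.mod ((p : Int) + 1) 2 := by
        have e1 : (((p % 2 : Nat) : Int) + 1) = ((p % 2 + 1 : Nat) : Int) := by push_cast; ring
        rw [e1, hx, hmod1]
      rw [this]
      simp only [Prod.mk.injEq]
      exact ⟨by push_cast; ring, by ring⟩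

-- B's whole loop equals A's summed digit list over the expansion of the same characters
theorem pvMain (cs : List Char) (h : ∀ c ∈ cs, 48 ≤ c.toNat ∧ c.toNat ≤ 126) (p : Nat) (t : Int) :
    cs.foldl pvStepB ((p : Int), t)
      = (((p + (cs.flatMap pvConvStep).length : Nat) : Int),
         t + pvSumDig (cs.flatMap pvConvStep) (p : Int)) := by
  induction cs generalizing p t with
  | nil => simp [pvSumDig]
  | cons c l ih =>
    obtain ⟨hc, hl⟩ := List.forall_mem_cons.mp h
    rw [List.foldl_cons, pvPerChar c hc.1 hc.2 p t, ih hl (p + (pvConvStep c).length)]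
    rw [List.flatMap_cons, pvSumDig_append, List.length_append]
    simp only [Prod.mk.injEq]
    exact ⟨by congr 1; omega, by push_cast; ring⟩

theorem pvCodeChars (short_code : String) (hdom : Dom_short_code_to_kr_isin short_code)
    (hpre : Pre_short_code_to_kr_isin short_code) :
    ∀ c ∈ ("KR7" ++ PySem.Str.strip short_code ++ "00").toList,
      48 ≤ c.toNat ∧ c.toNat ≤ 126 := by
  intro c hc
  rw [String.toList_append, String.toList_append] at hc
  have hsub : (PySem.Str.strip short_code).toList ⊆ short_code.toList := by
    rw [PySem.Str.toList_strip]
    unfold PySem.Chars.strip PySem.Chars.rstrip PySem.Chars.lstrip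
    intro x hx
    have := (List.dropWhile_sublist _ (l := ((List.dropWhile PySem.Chars.isspace short_code.toList).reverse))).subset (List.mem_reverse.mp hx)
    exact (List.dropWhile_sublist _ (l := short_code.toList)).subset (List.mem_reverse.mp this)
  rcases List.mem_append.mp hc with h | h
  · rcases List.mem_append.mp h with h1 | h2
    · fin_cases h1 <;> decide
    · have hge : 48 ≤ c.toNat := by
        unfold Pre_short_code_to_kr_isin at hpre
        simp only [List.all_eq_true, decide_eq_true_eq] at hpre
        exact hpre c h2
      have hdc : pvDomChar c = true := by
        have hall := hdom
        unfold Dom_short_code_to_kr_isin pvDomStr at hall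
        exact List.all_eq_true.mp hall c (hsub h2)
      simp only [pvDomChar, Bool.or_eq_true, Bool.and_eq_true, decide_eq_true_eq,
        beq_iff_eq] at hdc
      omega
  · fin_cases h <;> decide

-- ===== VERDICT (by name: the statement is the Claim_ definition above) =====
theorem short_code_to_kr_isin_spec : Claim_equal_short_code_to_kr_isin := by
  intro short_code hdom hpre
  unfold Spec_short_code_to_kr_isin
  simp only [short_code_to_kr_isin, short_code_to_kr_isin_alt]
  have hchars := pvCodeChars short_code hdom hpre
  set code := "KR7" ++ PySem.Str.strip short_code ++ "00" with hcode
  have hconv : code.toList.foldl (fun acc c => acc ++ pvConvStep c) []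
      = code.toList.flatMap pvConvStep := by
    rw [PySem.List.foldl_append_eq_flatMap]; simp
  have hdig : ∀ l : List Char,
      (PySem.List.enumerate l).foldl (fun acc p => acc ++ pvDigStep p) [] = (PySem.List.enumerate l).flatMap pvDigStep := by
    intro l; rw [PySem.List.foldl_append_eq_flatMap]; simp
  have hB := pvMain code.toList hchars 0 0
  simp only [Nat.cast_zero] at hB
  rw [hB, hconv, hdig]
  have : ((PySem.List.enumerate (code.toList.flatMap pvConvStep)).flatMap pvDigStep).sum
      = pvSumDig (code.toList.flatMap pvConvStep) 0 := rfl
  rw [this]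
  simp
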